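-- pv_equiv track=rewrite | github.com/aryxnj/Design-and-Professional-Skills | Scenarios/proj1/app/src/main/python/main.py | sort_polynomial_desc
-- ===== SOURCE A (Python) =====
-- def sort_polynomial_desc(poly):
--     # Split the polynomial string into terms, handling spaces
--     terms = [term.strip() for term in poly.split("+")]
--     # Extract the power of each term and sort indices in descending order
--     powers = []
--     for term in terms:
--         split = term.split("^")
--         if len(split) > 1:
--             if split[1].isdigit():
--                 powers.append(int(split[1]))
--             else:
--                 powers.append(int(split[1].split('/')[0]))
--         else:
--             if 'x' in split[0]:
--                 powers.append(0)
--             else: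
--                 powers.append(-1)
--     sorted_indices = sorted(range(len(powers)), key=lambda i: -powers[i])
--     # Use sorted indices to reorder the terms in descending order
--     sorted_terms = [terms[i] for i in sorted_indices]
--     # Join the sorted terms into a string
--     return " + ".join(sorted_terms)
-- ===== SOURCE B (Python) =====
-- def _power(term):
--     split = term.split("^")
--     if len(split) > 1:
--         if split[1].isdigit():
--             return int(split[1])
--         return int(split[1].split('/')[0])
--     return 0 if 'x' in split[0] else -1
--
--
-- def sort_polynomial_desc(poly):
--     # Group the terms into power-buckets (encounter order inside each bucket),
--     # then emit the buckets by descending power.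
--     terms = [term.strip() for term in poly.split("+")]
--     buckets = {}
--     for term in terms:
--         buckets.setdefault(_power(term), []).append(term)
--     out = []
--     for p in sorted(buckets, reverse=True):
--         out.extend(buckets[p])
--     return " + ".join(out)
-- ===== Notes on version B (the rewrite author's own statement) =====
-- stated objective: alternative
-- what changed: Replaces A's index-keyed comparison sort (sorted(range(n), key=lambda i: -powers[i]) then reorder) by a group-by pass: each term is appended to a dict bucket keyed by its power, and the output is emitted by iterating the distinct powers in descending order; Pre_ excludes only inputs where both parsers raise ValueError on a non-integer exponent.
import Mathlib
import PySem

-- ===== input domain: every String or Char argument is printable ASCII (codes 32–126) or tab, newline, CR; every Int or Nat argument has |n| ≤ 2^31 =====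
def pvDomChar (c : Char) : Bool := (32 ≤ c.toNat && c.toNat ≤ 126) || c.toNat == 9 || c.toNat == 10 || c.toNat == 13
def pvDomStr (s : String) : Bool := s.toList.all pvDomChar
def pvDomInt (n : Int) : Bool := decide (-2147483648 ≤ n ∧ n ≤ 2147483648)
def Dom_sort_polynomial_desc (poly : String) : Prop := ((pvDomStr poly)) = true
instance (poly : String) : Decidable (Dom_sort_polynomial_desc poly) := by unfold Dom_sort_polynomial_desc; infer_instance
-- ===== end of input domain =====

-- B groups the terms into power-keyed dict buckets and emits the buckets by descending
-- power, instead of A's stable comparison sort of the index list (alternative algorithm).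

-- ===== PORT A =====
-- int(...) is ported as (ofChars? _).getD 0; Pre_ excludes the inputs where Python raises ValueError there.
def sort_polynomial_desc (poly : String) : String :=
  let terms : List (List Char) :=
    (PySem.Chars.splitOn poly.toList ['+']).map (fun t => PySem.Chars.strip t)
  let powers : List Int := terms.foldl (fun acc term =>
      let s := PySem.Chars.splitOn term ['^']
      if s.length > 1 then
        if PySem.Chars.strIsdigit (PySem.List.pyGetD s 1 []) then
          acc ++ [(PySem.Int.ofChars? (PySem.List.pyGetD s 1 [])).getD 0]
        else
          acc ++ [(PySem.Int.ofChars? (PySem.List.pyGetD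
                    (PySem.Chars.splitOn (PySem.List.pyGetD s 1 []) ['/']) 0 [])).getD 0]
      else
        if PySem.Chars.isIn ['x'] (PySem.List.pyGetD s 0 []) then acc ++ [(0 : Int)]
        else acc ++ [(-1 : Int)]) []
  let sorted_indices : List Int :=
    PySem.List.sorted (PySem.List.pyRange 0 (PySem.List.len powers))
      (fun i => -(PySem.List.pyGetD powers i 0))
  let sorted_terms : List (List Char) := sorted_indices.map (fun i => PySem.List.pyGetD terms i [])
  String.ofList (PySem.Chars.join [' ', '+', ' '] sorted_terms)

-- ===== PORT B =====
-- helper _power of Source B (the same parsing branches as A, factored out)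
def pvPowB (term : List Char) : Int :=
  let s := PySem.Chars.splitOn term ['^']
  if s.length > 1 then
    if PySem.Chars.strIsdigit (PySem.List.pyGetD s 1 []) then
      (PySem.Int.ofChars? (PySem.List.pyGetD s 1 [])).getD 0
    else
      (PySem.Int.ofChars? (PySem.List.pyGetD
        (PySem.Chars.splitOn (PySem.List.pyGetD s 1 []) ['/']) 0 [])).getD 0
  else
    if PySem.Chars.isIn ['x'] (PySem.List.pyGetD s 0 []) then 0 else -1

def sort_polynomial_desc_alt (poly : String) : String :=
  let terms : List (List Char) :=
    (PySem.Chars.splitOn poly.toList ['+']).map (fun t => PySem.Chars.strip t)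
  let buckets : PySem.Dict Int (List (List Char)) :=
    terms.foldl (fun d t => d.modify (pvPowB t) [] (fun l => l ++ [t])) PySem.Dict.empty
  let out : List (List Char) :=
    (PySem.List.sorted buckets.keys (fun p => p) true).foldl
      (fun acc p => acc ++ buckets.getD p []) []
  String.ofList (PySem.Chars.join [' ', '+', ' '] out)

-- ===== PRECONDITION & SPEC =====
-- Pre_ excludes exactly the inputs where A (and B alike) raises ValueError: a term whose part
-- after the first '^' is not digits-only and whose part before the first '/' is not int()-parsable.
def pvTermOk (t : List Char) : Bool :=
  let s := PySem.Chars.splitOn t ['^']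
  if s.length > 1 then
    PySem.Chars.strIsdigit (PySem.List.pyGetD s 1 []) ||
      (PySem.Int.ofChars? (PySem.List.pyGetD
        (PySem.Chars.splitOn (PySem.List.pyGetD s 1 []) ['/']) 0 [])).isSome
  else true

def Pre_sort_polynomial_desc (poly : String) : Prop :=
  ((PySem.Chars.splitOn poly.toList ['+']).map (fun t => PySem.Chars.strip t)).all pvTermOk = true
instance (poly : String) : Decidable (Pre_sort_polynomial_desc poly) := by
  unfold Pre_sort_polynomial_desc; infer_instance

def pvWitness_sort_polynomial_desc : String := "x^2 + 3x + 4"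

def Spec_sort_polynomial_desc (poly : String) (out : String) : Prop := out = sort_polynomial_desc_alt poly
instance (poly : String) (out : String) : Decidable (Spec_sort_polynomial_desc poly out) := by
  unfold Spec_sort_polynomial_desc; infer_instance

-- ===== CLAIM (what is proved, stated in full; the proofs are below) =====
def Claim_equal_sort_polynomial_desc : Prop := ∀ (poly : String), Dom_sort_polynomial_desc poly → Pre_sort_polynomial_desc poly → Spec_sort_polynomial_desc poly (sort_polynomial_desc poly)

-- ===== LEMMAS AND PROOFS =====

-- the emitted list: the buckets (in the order of D) of the elements of ts with that key
def pvEmit {β : Type} (f : β → Int) (D : List Int) (ts : List β) : List β :=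
  D.flatMap (fun p => ts.filter (fun x => f x == p))

theorem mem_pvEmit {β : Type} (f : β → Int) (D : List Int) (ts : List β) (y : β)
    (h : y ∈ pvEmit f D ts) : f y ∈ D ∧ y ∈ ts := by
  simp only [pvEmit, List.mem_flatMap, List.mem_filter] at h
  obtain ⟨p, hp, hy, hk⟩ := h
  exact ⟨by simpa using (beq_iff_eq.mp hk ▸ hp), hy⟩

theorem pvEmit_snoc_of_ne {β : Type} (f : β → Int) (D : List Int) (ts : List β) (t : β)
    (h : f t ∉ D) : pvEmit f D (ts ++ [t]) = pvEmit f D ts := by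
  induction D with
  | nil => rfl
  | cons p D ih =>
    have hne : (f t == p) = false := by
      simp only [List.mem_cons, not_or] at h
      simpa using h.1
    have ih' := ih (by simp only [List.mem_cons, not_or] at h; exact h.2)
    simp [pvEmit, List.filter_append, hne] at ih' ⊢
    exact ih'

theorem insertBy_cons_of_head {α : Type} (before : α → α → Bool) (t : α) (l : List α)
    (h : ∀ y ∈ l.head?, before t y = true) :
    PySem.List.insertBy before t l = t :: l := by
  cases l with
  | nil => rfl
  | cons y ys => simp [PySem.List.insertBy, h y rfl]

theorem insertBy_append_left {α : Type} (before : α → α → Bool) (t : α) (b rest : List α)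
    (h : ∀ y ∈ b, before t y = false) :
    PySem.List.insertBy before t (b ++ rest) = b ++ PySem.List.insertBy before t rest := by
  induction b with
  | nil => rfl
  | cons y ys ih =>
    have hy : before t y = false := h y (by simp)
    cases rest <;> cases ys <;> simp_all [PySem.List.insertBy]

-- stable insertion of one element into the emitted form
theorem pvInsert_emit {β : Type} (f : β → Int) (t : β) (D : List Int) (ts : List β)
    (hD : D.Pairwise (fun a b => b < a))
    (hnew : f t ∉ D → ∀ x ∈ ts, f x ≠ f t) :
    PySem.List.insertBy (fun a b => decide (-(f a) < -(f b))) t (pvEmit f D ts)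
      = if f t ∈ D then pvEmit f D (ts ++ [t])
        else pvEmit f (PySem.List.insertBy (fun a b => decide ((fun p => p) b < (fun p => p) a)) (f t) D) (ts ++ [t]) := by
  induction D with
  | nil =>
    have hts : ∀ x ∈ ts, f x ≠ f t := hnew (by simp)
    have hfil : ts.filter (fun x => f x == f t) = [] := by
      apply List.filter_eq_nil_iff.mpr
      intro x hx; simpa using hts x hx
    simp [pvEmit, PySem.List.insertBy, List.filter_append, hfil]
  | cons p D ih =>
    have hDp : ∀ q ∈ D, q < p := fun q hq => (List.pairwise_cons.mp hD).1 q hq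
    have hDt : D.Pairwise (fun a b => b < a) := (List.pairwise_cons.mp hD).2
    have emit_cons : ∀ (us : List β), pvEmit f (p :: D) us
        = us.filter (fun x => f x == p) ++ pvEmit f D us := fun us => rfl
    rcases lt_trichotomy p (f t) with hlt | heq | hgt
    · -- f t is a new maximal key: t goes to the very front, f t to the front of D
      have hnotin : f t ∉ p :: D := by
        simp only [List.mem_cons, not_or]
        exact ⟨by omega, fun h => absurd (hDp _ h) (by omega)⟩
      have hts : ∀ x ∈ ts, f x ≠ f t := hnew hnotin
      have hL : PySem.List.insertBy (fun a b => decide (-(f a) < -(f b))) t (pvEmit f (p :: D) ts)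
          = t :: pvEmit f (p :: D) ts := by
        apply insertBy_cons_of_head
        intro y hy
        have hmem : y ∈ pvEmit f (p :: D) ts := List.mem_of_mem_head? hy
        have := (mem_pvEmit f _ _ y hmem).1
        have hle : f y ≤ p := by
          rcases List.mem_cons.mp this with h | h
          · omega
          · exact le_of_lt (hDp _ h)
        simp; omega
      rw [hL, if_neg hnotin]
      have hins : PySem.List.insertBy (fun a b => decide ((fun p => p) b < (fun p => p) a)) (f t) (p :: D)
          = f t :: p :: D := by
        simp [PySem.List.insertBy, hlt]
      rw [hins]
      have hfil : (ts ++ [t]).filter (fun x => f x == f t) = [t] := by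
        rw [List.filter_append]
        have : ts.filter (fun x => f x == f t) = [] := by
          apply List.filter_eq_nil_iff.mpr
          intro x hx; simpa using hts x hx
        simp [this]
      show _ = (ts ++ [t]).filter (fun x => f x == f t) ++ pvEmit f (p :: D) (ts ++ [t])
      rw [hfil, pvEmit_snoc_of_ne f (p :: D) ts t hnotin]
      rfl
    · -- f t = p : t is appended to this bucket
      subst heq
      have hnotD : f t ∉ D := fun h => absurd (hDp _ h) (by omega)
      rw [emit_cons, insertBy_append_left]
      · rw [insertBy_cons_of_head]
        · rw [if_pos (by simp), emit_cons, List.filter_append,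
            pvEmit_snoc_of_ne f D ts t hnotD]
          simp
        · intro y hy
          have hmem := List.mem_of_mem_head? hy
          have hlt : f y < f t := hDp _ (mem_pvEmit f _ _ y hmem).1
          simp; omega
      · intro y hy
        have : f y = f t := by simpa using (List.mem_filter.mp hy).2
        simp [this]
    · -- f t < p : skip this bucket and recurse
      have hnep : f t ≠ p := by omega
      have hnew' : f t ∉ D → ∀ x ∈ ts, f x ≠ f t := by
        intro h
        exact hnew (by simp only [List.mem_cons, not_or]; exact ⟨hnep, h⟩)
      have hbucket : ∀ y ∈ ts.filter (fun x => f x == p),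
          (fun a b => decide (-(f a) < -(f b))) t y = false := by
        intro y hy
        have : f y = p := by simpa using (List.mem_filter.mp hy).2
        simp [this]; omega
      rw [emit_cons, insertBy_append_left _ _ _ _ hbucket, ih hDt hnew']
      have hfilp : (ts ++ [t]).filter (fun x => f x == p) = ts.filter (fun x => f x == p) := by
        rw [List.filter_append]
        simp [hnep]
      by_cases hmem : f t ∈ D
      · rw [if_pos hmem, if_pos (by simp [hmem]), emit_cons, hfilp]
      · rw [if_neg hmem, if_neg (by simp only [List.mem_cons, not_or]; exact ⟨hnep, hmem⟩)]
        have hins : PySem.List.insertBy (fun a b => decide ((fun p => p) b < (fun p => p) a)) (f t) (p :: D)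
            = p :: PySem.List.insertBy (fun a b => decide ((fun p => p) b < (fun p => p) a)) (f t) D := by
          simp [PySem.List.insertBy]
          omega
        rw [hins]
        show _ = (ts ++ [t]).filter (fun x => f x == p) ++ _
        rw [hfilp]
        simp [pvEmit, List.flatMap]

theorem pvSorted_snoc {β : Type} (l : List β) (x : β) (key : β → Int) :
    PySem.List.sorted (l ++ [x]) key
      = PySem.List.insertBy (fun a b => decide (key a < key b)) x (PySem.List.sorted l key) := by
  rw [PySem.List.sorted_eq_foldl_insertBy, PySem.List.sorted_eq_foldl_insertBy, List.foldl_append]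
  rfl

theorem pvSortedRev_snoc {β : Type} (l : List β) (x : β) (key : β → Int) :
    PySem.List.sorted (l ++ [x]) key true
      = PySem.List.insertBy (fun a b => decide (key b < key a)) x (PySem.List.sorted l key true) := by
  rw [PySem.List.sorted_rev_eq_foldl_insertBy, PySem.List.sorted_rev_eq_foldl_insertBy, List.foldl_append]
  rfl

theorem pvDedup_snoc {α : Type} [BEq α] [LawfulBEq α] (l : List α) (q : α) :
    PySem.List.dedup (l ++ [q])
      = if q ∈ l then PySem.List.dedup l else PySem.List.dedup l ++ [q] := by
  rw [PySem.List.dedup_eq_ofList, PySem.Set.ofList_append_singleton]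
  by_cases h : q ∈ l
  · rw [if_pos h, PySem.Set.add_of_mem (by rwa [PySem.Set.mem_ofList]), PySem.List.dedup_eq_ofList]
  · rw [if_neg h, PySem.Set.add_of_not_mem (by rwa [PySem.Set.mem_ofList]), PySem.List.dedup_eq_ofList]

theorem pvDescKeys_pairwise (E : List Int) (hnd : E.Nodup) :
    (PySem.List.sorted E (fun p => p) true).Pairwise (fun a b => b < a) := by
  have h1 := PySem.List.sorted_pairwise_rev E (fun p => p)
  have h2 : (PySem.List.sorted E (fun p => p) true).Nodup :=
    ((PySem.List.sorted_perm E (fun p => p) true).nodup_iff).mpr hnd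
  exact (h1.and h2).imp (fun h => lt_of_le_of_ne h.1 h.2.symm)

-- A's stable sort is the group-by-key emission over the distinct keys in descending order
theorem pvStableGroup {β : Type} (f : β → Int) (xs : List β) :
    PySem.List.sorted xs (fun x => -(f x))
      = pvEmit f (PySem.List.sorted (PySem.List.dedup (xs.map f)) (fun p => p) true) xs := by
  induction xs using List.reverseRecOn with
  | nil => rfl
  | append_singleton ts t ih =>
    have hpair := pvDescKeys_pairwise (PySem.List.dedup (ts.map f))
      (PySem.List.nodup_dedup (ts.map f))
    rw [pvSorted_snoc, ih]
    by_cases hm : f t ∈ ts.map f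
    · have hmD : f t ∈ PySem.List.sorted (PySem.List.dedup (ts.map f)) (fun p => p) true := by
        rw [PySem.List.mem_sorted, PySem.List.mem_dedup]; exact hm
      rw [pvInsert_emit f t _ ts hpair (fun h => absurd hmD h), if_pos hmD]
      simp only [List.map_append, List.map_cons, List.map_nil]
      rw [pvDedup_snoc, if_pos hm]
    · have hmD : f t ∉ PySem.List.sorted (PySem.List.dedup (ts.map f)) (fun p => p) true := by
        rw [PySem.List.mem_sorted, PySem.List.mem_dedup]; exact hm
      have hnew : ∀ x ∈ ts, f x ≠ f t := by
        intro x hx h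
        exact hm (h ▸ List.mem_map_of_mem hx)
      rw [pvInsert_emit f t _ ts hpair (fun _ => hnew), if_neg hmD]
      simp only [List.map_append, List.map_cons, List.map_nil]
      rw [pvDedup_snoc, if_neg hm, pvSortedRev_snoc]

-- index-level sort-and-reorder translated to term level (Nat indices)
theorem pvIdxNat {β : Type} (f : β → Int) (d : β) (p : Int) : ∀ (ts : List β),
    ((List.range ts.length).filter (fun k => (ts.map f).getD k 0 == p)).map (fun k => ts.getD k d)
    = ts.filter (fun x => f x == p) := by
  intro ts
  induction ts with
  | nil => rfl
  | cons x ts ih =>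
    rw [List.length_cons, List.range_succ_eq_map, List.map_cons, List.filter_cons]
    have hcomp : ((fun k => (f x :: List.map f ts).getD k 0 == p) ∘ Nat.succ)
        = (fun k => (List.map f ts).getD k 0 == p) := rfl
    rw [List.filter_map, hcomp, List.getD_cons_zero, List.filter_cons]
    by_cases hx : (f x == p) = true
    · rw [if_pos hx, if_pos hx, List.map_cons, List.map_map]
      have hc2 : ((fun k => (x :: ts).getD k d) ∘ Nat.succ) = (fun k => ts.getD k d) := rfl
      rw [hc2, ih, List.getD_cons_zero]
    · rw [if_neg hx, if_neg hx, List.map_map]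
      have hc2 : ((fun k => (x :: ts).getD k d) ∘ Nat.succ) = (fun k => ts.getD k d) := rfl
      rw [hc2, ih]

theorem pvIdxFilter {β : Type} (f : β → Int) (d : β) (p : Int) (ts : List β) :
    ((PySem.List.pyRange 0 (PySem.List.len (ts.map f))).filter
        (fun i => PySem.List.pyGetD (ts.map f) i 0 == p)).map (fun i => PySem.List.pyGetD ts i d)
    = ts.filter (fun x => f x == p) := by
  have hlen : PySem.List.len (ts.map f) = ((ts.length : Nat) : Int) := by
    simp [PySem.List.len]
  rw [hlen, PySem.List.pyRange_zero_natCast, List.filter_map]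
  have hc : ((fun i => PySem.List.pyGetD (ts.map f) i 0 == p) ∘ (fun k : Nat => (k : Int)))
      = (fun k => (ts.map f).getD k 0 == p) := by
    funext k; simp [Function.comp, PySem.List.pyGetD_natCast]
  rw [hc, List.map_map]
  have hc2 : ((fun i => PySem.List.pyGetD ts i d) ∘ (fun k : Nat => (k : Int)))
      = (fun k => ts.getD k d) := by
    funext k; simp [Function.comp, PySem.List.pyGetD_natCast]
  rw [hc2, pvIdxNat]

-- A's powers loop computes the per-term power map
theorem pvPowers_eq (terms : List (List Char)) :
    terms.foldl (fun acc term =>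
      let s := PySem.Chars.splitOn term ['^']
      if s.length > 1 then
        if PySem.Chars.strIsdigit (PySem.List.pyGetD s 1 []) then
          acc ++ [(PySem.Int.ofChars? (PySem.List.pyGetD s 1 [])).getD 0]
        else
          acc ++ [(PySem.Int.ofChars? (PySem.List.pyGetD
                    (PySem.Chars.splitOn (PySem.List.pyGetD s 1 []) ['/']) 0 [])).getD 0]
      else
        if PySem.Chars.isIn ['x'] (PySem.List.pyGetD s 0 []) then acc ++ [(0 : Int)]
        else acc ++ [(-1 : Int)]) [] = terms.map pvPowB := by
  have h : (fun (acc : List Int) term =>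
      let s := PySem.Chars.splitOn term ['^']
      if s.length > 1 then
        if PySem.Chars.strIsdigit (PySem.List.pyGetD s 1 []) then
          acc ++ [(PySem.Int.ofChars? (PySem.List.pyGetD s 1 [])).getD 0]
        else
          acc ++ [(PySem.Int.ofChars? (PySem.List.pyGetD
                    (PySem.Chars.splitOn (PySem.List.pyGetD s 1 []) ['/']) 0 [])).getD 0]
      else
        if PySem.Chars.isIn ['x'] (PySem.List.pyGetD s 0 []) then acc ++ [(0 : Int)]
        else acc ++ [(-1 : Int)])
      = (fun acc term => acc ++ [pvPowB term]) := by
    funext acc term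
    dsimp only [pvPowB]
    split_ifs <;> rfl
  rw [h]
  have := PySem.List.foldl_append_singleton_eq_map pvPowB terms []
  simpa using this

-- A's sorted index list in emitted form
theorem pvA_sorted (pw : List Int) :
    PySem.List.sorted (PySem.List.pyRange 0 (PySem.List.len pw))
        (fun i => -(PySem.List.pyGetD pw i 0))
      = pvEmit (fun i => PySem.List.pyGetD pw i 0)
          (PySem.List.sorted (PySem.List.dedup pw) (fun p => p) true)
          (PySem.List.pyRange 0 (PySem.List.len pw)) := by
  have h := pvStableGroup (fun i => PySem.List.pyGetD pw i 0)
    (PySem.List.pyRange 0 (PySem.List.len pw))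
  rw [PySem.List.map_pyGetD_pyRange_zero pw 0] at h
  exact h

-- B's bucket dict: lookup is the filter of the terms with that power
theorem pvBuckets_getD (terms : List (List Char)) (p : Int) :
    (terms.foldl (fun d t => d.modify (pvPowB t) [] (fun l => l ++ [t])) PySem.Dict.empty).getD p []
      = terms.filter (fun t => pvPowB t == p) := by
  have h : terms.foldl (fun d t => d.modify (pvPowB t) [] (fun l => l ++ [t])) PySem.Dict.empty
      = (terms.map (fun t => (pvPowB t, t))).foldl
          (fun d q => d.modify q.1 [] (fun x => x ++ [q.2])) PySem.Dict.empty := by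
    rw [List.foldl_map]
  rw [h, PySem.Dict.getD_foldl_modify_append, PySem.Dict.getD_empty, List.nil_append,
    List.filter_map, List.map_map]
  have hc : ((fun q : Int × List Char => q.1 == p) ∘ (fun t => (pvPowB t, t)))
      = (fun t => pvPowB t == p) := rfl
  have hc2 : ((fun q : Int × List Char => q.2) ∘ (fun t => (pvPowB t, t)))
      = (fun t : List Char => t) := rfl
  rw [hc, hc2, List.map_id']

-- B's bucket dict: keys are the distinct powers in encounter order
theorem pvBuckets_keys (terms : List (List Char)) :
    (terms.foldl (fun d t => d.modify (pvPowB t) [] (fun l => l ++ [t])) PySem.Dict.empty).keys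
      = PySem.List.dedup (terms.map pvPowB) := by
  rw [PySem.Dict.keys_foldl_modify_key terms pvPowB [] (fun _ t => fun l => l ++ [t])]
  rw [PySem.Dict.keys_empty, PySem.Set.update_nil_left, PySem.List.dedup_eq_ofList]

-- the two emitted term lists coincide
theorem pvMain (terms : List (List Char)) :
    (PySem.List.sorted
        (PySem.List.pyRange 0 (PySem.List.len (terms.map pvPowB)))
        (fun i => -(PySem.List.pyGetD (terms.map pvPowB) i 0))).map
      (fun i => PySem.List.pyGetD terms i [])
    = (PySem.List.sorted
          (terms.foldl (fun d t => d.modify (pvPowB t) [] (fun l => l ++ [t]))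
            PySem.Dict.empty).keys (fun p => p) true).foldl
        (fun acc p => acc ++ (terms.foldl (fun d t => d.modify (pvPowB t) [] (fun l => l ++ [t]))
            PySem.Dict.empty).getD p []) [] := by
  rw [pvA_sorted (terms.map pvPowB)]
  rw [pvBuckets_keys, PySem.List.foldl_append_eq_flatMap, List.nil_append]
  unfold pvEmit
  rw [List.map_flatMap]
  have h1 : (fun p => ((PySem.List.pyRange 0 (PySem.List.len (terms.map pvPowB))).filter
        (fun i => PySem.List.pyGetD (terms.map pvPowB) i 0 == p)).map
          (fun i => PySem.List.pyGetD terms i []))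
      = (fun p => terms.filter (fun t => pvPowB t == p)) := by
    funext p
    exact pvIdxFilter pvPowB [] p terms
  have h2 : (fun p => (terms.foldl (fun d t => d.modify (pvPowB t) [] (fun l => l ++ [t]))
        PySem.Dict.empty).getD p [])
      = (fun p => terms.filter (fun t => pvPowB t == p)) := by
    funext p
    exact pvBuckets_getD terms p
  rw [h1, h2]

-- ===== VERDICT (by name: the statement is the Claim_ definition above) =====
theorem sort_polynomial_desc_spec : Claim_equal_sort_polynomial_desc := by
  intro poly _ _
  unfold Spec_sort_polynomial_desc sort_polynomial_desc sort_polynomial_desc_alt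
  have hp := pvPowers_eq ((PySem.Chars.splitOn poly.toList ['+']).map (fun t => PySem.Chars.strip t))
  have h := pvMain ((PySem.Chars.splitOn poly.toList ['+']).map (fun t => PySem.Chars.strip t))
  rw [← hp] at h
  exact congrArg (fun l => String.ofList (PySem.Chars.join [' ', '+', ' '] l)) h
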